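-- pv_equiv track=rewrite | github.com/avinpereira/code-forces | hulk.py | hulk
-- ===== SOURCE A (Python) =====
-- def hulk(n):
--     i = 1
--     result = ""
--     while(i <= n):
--         if(i == n and i % 2 == 0):
--             result+="I love it"
--             return result
--         elif (i == n and i % 2 != 0):
--             result+="I hate it"
--             return result
--         #i is odd
--         elif(i % 2 != 0):
--             result+="I hate that "
--         else:
--             result+="I love that "
--         i+=1
-- ===== SOURCE B (Python) =====
-- def hulk(n):
--     if n <= 0:
--         return ""
--     k, r = divmod(n - 1, 2)
--     prefix = "I hate that I love that " * k + ("I hate that " if r else "")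
--     return prefix + ("I hate it" if n % 2 else "I love it")
-- ===== Notes on version B (the rewrite author's own statement) =====
-- stated objective: faster
-- what changed: Replaces the per-index while-loop with its repeated string concatenation by a closed-form repetition: block * ((n-1)//2) plus a parity remainder and the final word.
-- outside the precondition, e.g. on hulk(0): A returns None, B returns ''
import Mathlib
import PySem

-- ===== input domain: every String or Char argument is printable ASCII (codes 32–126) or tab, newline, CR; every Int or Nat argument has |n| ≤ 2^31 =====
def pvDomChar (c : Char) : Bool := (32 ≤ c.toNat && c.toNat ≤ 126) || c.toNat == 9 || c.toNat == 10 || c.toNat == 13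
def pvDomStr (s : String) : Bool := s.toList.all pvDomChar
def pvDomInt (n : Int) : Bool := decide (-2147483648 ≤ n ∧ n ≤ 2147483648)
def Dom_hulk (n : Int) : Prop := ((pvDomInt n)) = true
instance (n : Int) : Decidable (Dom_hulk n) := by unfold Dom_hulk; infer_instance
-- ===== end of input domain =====

-- B replaces A's per-index while-loop by a closed-form repetition (block * k) plus parity handling; objective: simpler.


-- ===== PORT A =====
-- A's while-loop, fuel = n.toNat + 1 (enough: the loop runs at most n iterations); fuel only makes it total.
def hulkLoop : Nat → Int → Int → String → String
  | 0, _, _, result => result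
  | fuel + 1, n, i, result =>
    if i ≤ n then
      if i == n && PySem.Int.mod i 2 == 0 then result ++ "I love it"
      else if i == n && PySem.Int.mod i 2 != 0 then result ++ "I hate it"
      else if PySem.Int.mod i 2 != 0 then hulkLoop fuel n (i + 1) (result ++ "I hate that ")
      else hulkLoop fuel n (i + 1) (result ++ "I love that ")
    else result

def hulk (n : Int) : String := hulkLoop (n.toNat + 1) n 1 ""

-- ===== PORT B =====
-- Python's s * k on a string
def strRepeat (s : String) : Nat → String
  | 0 => ""
  | k + 1 => s ++ strRepeat s k

def hulk_alt (n : Int) : String :=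
  if n ≤ 0 then ""
  else
    let k := PySem.Int.floordiv (n - 1) 2
    let r := PySem.Int.mod (n - 1) 2
    let prefx := strRepeat "I hate that I love that " k.toNat
                   ++ (if r != 0 then "I hate that " else "")
    prefx ++ (if PySem.Int.mod n 2 != 0 then "I hate it" else "I love it")

-- ===== PRECONDITION & SPEC =====
-- Pre_ excludes n ≤ 0, where Python A falls out of its loop and returns None, not a string; B returns "".
def Pre_hulk (n : Int) : Prop := 1 ≤ n
instance (n : Int) : Decidable (Pre_hulk n) := by unfold Pre_hulk; infer_instance
def pvWitness_hulk : Int := (5)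
def Spec_hulk (n : Int) (out : String) : Prop := out = hulk_alt n
instance (n : Int) (out : String) : Decidable (Spec_hulk n out) := by unfold Spec_hulk; infer_instance

-- ===== CLAIM (what is proved, stated in full; the proofs are below) =====
def Claim_equal_hulk : Prop := ∀ (n : Int), Dom_hulk n → Pre_hulk n → Spec_hulk n (hulk n)

-- ===== LEMMAS AND PROOFS =====

-- result is a pure accumulator: a common prefix factors out of the loop
theorem hulkLoop_prefix (f : Nat) : ∀ (n i : Int) (a b : String),
    hulkLoop f n i (a ++ b) = a ++ hulkLoop f n i b := by
  induction f with
  | zero => intro n i a b; rfl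
  | succ f ih =>
    intro n i a b
    simp only [hulkLoop]
    split_ifs <;> simp [String.append_assoc, ih]

theorem mod_two_shift (i : Int) : PySem.Int.mod (i + 2) 2 = PySem.Int.mod i 2 := by
  simp only [PySem.Int.mod_eq_emod_of_pos (show (0:Int) < 2 by omega)]
  omega

-- shifting both i and n by 2 preserves every test in the loop body
theorem hulkLoop_shift (f : Nat) : ∀ (n i : Int) (res : String),
    hulkLoop f n (i + 2) res = hulkLoop f (n - 2) i res := by
  induction f with
  | zero => intro n i res; rfl
  | succ f ih =>
    intro n i res
    have h1 : (i + 2 ≤ n) ↔ (i ≤ n - 2) := by omega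
    have h2 : ((i + 2 : Int) == n) = (i == n - 2) := by
      rw [Bool.eq_iff_iff]
      simp only [beq_iff_eq]
      omega
    have h3 : i + 2 + 1 = (i + 1) + 2 := by ring
    simp only [hulkLoop, mod_two_shift, h1, h2, h3, ih]

theorem hulk_rec (n : Int) (h : 3 ≤ n) :
    hulk n = "I hate that I love that " ++ hulk (n - 2) := by
  have hf : n.toNat + 1 = (n.toNat - 1) + 1 + 1 := by omega
  have hf2 : (n - 2).toNat + 1 = n.toNat - 1 := by omega
  unfold hulk
  rw [hf]
  have e1 : ((1 : Int) == n) = false := by simp; omega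
  have e2 : ((2 : Int) == n) = false := by simp; omega
  have m1 : PySem.Int.mod 1 2 = 1 := by decide
  have m2 : PySem.Int.mod 2 2 = 0 := by decide
  simp only [hulkLoop, m1, m2, e1, e2, if_pos (show (1:Int) ≤ n by omega),
    if_pos (show (2:Int) ≤ n by omega), Bool.false_and]
  norm_num
  rw [show (3 : Int) = 1 + 2 by norm_num, hulkLoop_shift, hf2.symm,
    show ("I hate that " ++ "I love that " : String) = "I hate that I love that " ++ "" by rfl,
    hulkLoop_prefix]
  by_cases h4 : n = 3
  · subst h4; decide
  · simp only [if_pos (show (2:Int) ≤ n by omega)]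
    rw [if_neg (show ¬ (2:Int) = n by omega)]
    simp only [if_pos (show (1:Int) ≤ n - 2 by omega)]
    rw [if_neg (show ¬ (1:Int) = n - 2 by omega)]
    congr 1
    simp [hulkLoop, if_pos (show (1:Int) ≤ n - 2 by omega),
      show ((1:Int) == n - 2) = false by simp; omega, m1]

theorem hulk_alt_rec (n : Int) (h : 3 ≤ n) :
    hulk_alt n = "I hate that I love that " ++ hulk_alt (n - 2) := by
  unfold hulk_alt
  rw [if_neg (by omega : ¬ n ≤ 0), if_neg (by omega : ¬ n - 2 ≤ 0)]
  have hk : PySem.Int.floordiv (n - 1) 2 = PySem.Int.floordiv (n - 2 - 1) 2 + 1 := by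
    simp only [PySem.Int.floordiv_eq_ediv_of_pos (show (0:Int) < 2 by omega)]
    omega
  have hr : PySem.Int.mod (n - 1) 2 = PySem.Int.mod (n - 2 - 1) 2 := by
    simp only [PySem.Int.mod_eq_emod_of_pos (show (0:Int) < 2 by omega)]
    omega
  have hn : PySem.Int.mod n 2 = PySem.Int.mod (n - 2) 2 := by
    simp only [PySem.Int.mod_eq_emod_of_pos (show (0:Int) < 2 by omega)]
    omega
  have hknn : (PySem.Int.floordiv (n - 2 - 1) 2 + 1).toNat
      = (PySem.Int.floordiv (n - 2 - 1) 2).toNat + 1 := by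
    have : 0 ≤ PySem.Int.floordiv (n - 2 - 1) 2 := by
      rw [PySem.Int.floordiv_eq_ediv_of_pos (show (0:Int) < 2 by omega)]
      omega
    omega
  simp only [hk, hr, hn, hknn, strRepeat, String.append_assoc]

theorem hulk_eq_alt_aux : ∀ (m : Nat) (n : Int), n.toNat = m → 1 ≤ n → hulk n = hulk_alt n := by
  intro m
  induction m using Nat.strong_induction_on with
  | _ m ih =>
    intro n hm hn
    by_cases h1 : n = 1
    · subst h1; decide
    by_cases h2 : n = 2
    · subst h2; decide
    have h3 : 3 ≤ n := by omega
    rw [hulk_rec n h3, hulk_alt_rec n h3,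
      ih (n - 2).toNat (by omega) (n - 2) rfl (by omega)]

-- ===== VERDICT (by name: the statement is the Claim_ definition above) =====
theorem hulk_spec : Claim_equal_hulk := by
  intro n _ hpre
  exact hulk_eq_alt_aux n.toNat n rfl hpre
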